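-- pv_equiv track=rewrite | github.com/Echo446Ghq/Cracked-Cicada-3301-Third-Puzzle- | b.py | find_all_repeating_patterns
-- ===== SOURCE A (Python) =====
-- def find_all_repeating_patterns(data, length):
--     patterns = {}
--     for i in range(len(data) - length + 1):
--         pattern = data[i:i + length]
--         if pattern not in patterns:
--             patterns[pattern] = []
--         patterns[pattern].append(i)
--     return {k: v for k, v in patterns.items() if len(v) > 1}
-- ===== SOURCE B (Python) =====
-- def find_all_repeating_patterns(data, length):
--     n = len(data) - length + 1
--     pairs = sorted([(data[i:i + length], i) for i in range(n)], key=lambda p: p[0])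
--     groups = []
--     j = 0
--     while j < len(pairs):
--         k = pairs[j][0]
--         pos = []
--         while j < len(pairs) and pairs[j][0] == k:
--             pos.append(pairs[j][1])
--             j += 1
--         groups.append((k, pos))
--     repeats = [(k, pos) for k, pos in groups if len(pos) > 1]
--     repeats.sort(key=lambda kp: kp[1][0])
--     return dict(repeats)
-- ===== Notes on version B (the rewrite author's own statement) =====
-- stated objective: alternative
-- what changed: A groups start positions under their substring in a single hash-dict pass and filters the dict; B never groups by hashing: it stable-sorts the (substring, position) pairs by substring, collects maximal runs of equal adjacent substrings with a group-by scan, keeps runs longer than one, and finally orders the kept groups by their first position to restore first-occurrence order.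
import Mathlib
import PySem

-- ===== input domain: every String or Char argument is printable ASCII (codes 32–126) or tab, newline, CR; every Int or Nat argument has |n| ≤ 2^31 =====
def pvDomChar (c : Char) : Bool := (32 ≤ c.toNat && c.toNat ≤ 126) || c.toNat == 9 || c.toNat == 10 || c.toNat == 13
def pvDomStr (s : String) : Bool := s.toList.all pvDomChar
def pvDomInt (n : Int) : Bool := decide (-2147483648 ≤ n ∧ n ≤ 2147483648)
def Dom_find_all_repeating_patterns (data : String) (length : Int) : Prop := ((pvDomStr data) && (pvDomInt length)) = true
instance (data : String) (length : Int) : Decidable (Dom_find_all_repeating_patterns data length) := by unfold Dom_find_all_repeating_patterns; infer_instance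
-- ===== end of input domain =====

-- B replaces A's hash-dict grouping by sort-and-scan: stable-sort the (substring, position)
-- pairs by substring, collect maximal runs of equal adjacent substrings, keep runs of length
-- > 1, and order the kept groups by first position (= A's first-occurrence dict order);
-- objective: alternative algorithm, same return value (both programs are pure).

-- ===== PORT A =====
-- 'if pattern not in patterns: patterns[pattern] = []' followed by 'patterns[pattern].append(i)'
-- is exactly Dict.modify with default []: insert-or-update in place, keyed in first-occurrence order.
def find_all_repeating_patterns (data : String) (length : Int) : List (String × List Int) :=
  (((PySem.List.pyRange 0 ((PySem.Str.len data : Int) - length + 1) 1).foldl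
      (fun (d : PySem.Dict String (List Int)) i =>
        d.modify (PySem.Str.slice data (some i) (some (i + length))) [] (fun v => v ++ [i]))
      PySem.Dict.empty).items).filter (fun kv => decide (kv.2.length > 1))

-- ===== PORT B =====
-- Source B's while loop over the sorted pair list, carried as structural recursion on the
-- remaining pairs: k and pos are the current run's key and collected positions (pos.append(i));
-- a key change closes the current group and opens a new one.
def pvRunsGo (k : String) (pos : List Int) : List (String × Int) → List (String × List Int)
  | [] => [(k, pos)]
  | (k', i) :: rest =>
      if k' == k then pvRunsGo k (pos ++ [i]) rest
      else (k, pos) :: pvRunsGo k' [i] rest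

def pvRuns : List (String × Int) → List (String × List Int)
  | [] => []
  | (k, i) :: rest => pvRunsGo k [i] rest

def find_all_repeating_patterns_alt (data : String) (length : Int) : List (String × List Int) :=
  let pairs := PySem.List.sorted
      ((PySem.List.pyRange 0 ((PySem.Str.len data : Int) - length + 1) 1).map
        (fun i => (PySem.Str.slice data (some i) (some (i + length)), i)))
      (fun p => p.1) false
  let repeats := (pvRuns pairs).filter (fun kp => decide (kp.2.length > 1))
  -- key kp[1][0]: ported as pyGetD with default 0; exact here because every kept run is nonempty
  (PySem.Dict.ofList (PySem.List.sorted repeats (fun kp => PySem.List.pyGetD kp.2 0 0) false)).items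

-- ===== PRECONDITION & SPEC =====
def Spec_find_all_repeating_patterns (data : String) (length : Int) (out : List (String × List Int)) : Prop := out = find_all_repeating_patterns_alt data length
instance (data : String) (length : Int) (out : List (String × List Int)) : Decidable (Spec_find_all_repeating_patterns data length out) := by unfold Spec_find_all_repeating_patterns; infer_instance

-- ===== CLAIM (what is proved, stated in full; the proofs are below) =====
def Claim_equal_find_all_repeating_patterns : Prop := ∀ (data : String) (length : Int), Dom_find_all_repeating_patterns data length → Spec_find_all_repeating_patterns data length (find_all_repeating_patterns data length)

-- ===== LEMMAS AND PROOFS =====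

-- A's grouping loop, characterized: keys are the distinct substrings in first-occurrence order,
-- the value at k is the list of indices whose substring is k.
lemma items_group (f : Int → String) (L : List Int) :
    (L.foldl (fun (d : PySem.Dict String (List Int)) i => d.modify (f i) [] (fun v => v ++ [i]))
      PySem.Dict.empty).items
    = (PySem.Set.ofList (L.map f)).map
        (fun k => (k, (List.filter (fun p => p.1 == k) (L.map (fun i => (f i, i)))).map (·.2))) := by
  have hfold : (L.foldl (fun (d : PySem.Dict String (List Int)) i => d.modify (f i) [] (fun v => v ++ [i])) PySem.Dict.empty)
      = ((L.map (fun i => (f i, i))).foldl (fun d p => d.modify p.1 [] (fun v => v ++ [p.2])) PySem.Dict.empty) := by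
    rw [List.foldl_map]
  rw [hfold]
  have hnd : ((L.map (fun i => (f i, i))).foldl (fun d p => d.modify p.1 [] (fun v => v ++ [p.2])) PySem.Dict.empty).keys.Nodup :=
    PySem.Dict.nodup_keys_foldl_modify_key _ Prod.fst [] (fun _ p => (fun v => v ++ [p.2])) _
      (by simp [PySem.Dict.empty, PySem.Dict.keys])
  rw [PySem.Dict.items_eq_map_keys _ hnd []]
  rw [PySem.Dict.keys_foldl_modify_key _ Prod.fst [] (fun _ p => (fun v => v ++ [p.2]))]
  have hkeys : PySem.Set.update (PySem.Dict.empty : PySem.Dict String (List Int)).keys ((L.map (fun i => (f i, i))).map Prod.fst)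
      = PySem.Set.ofList (L.map f) := by
    simp [PySem.Set.update, PySem.Set.ofList, PySem.Dict.empty, PySem.Dict.keys, List.map_map, PySem.Set.empty]
    rfl
  rw [hkeys]
  apply List.map_congr_left
  intro k hk
  rw [PySem.Dict.getD_foldl_modify_append]
  simp [PySem.Dict.empty]
  rfl

-- (P.filter on the key).map snd is a filter of the index list itself
lemma filter_pairs_map_snd (f : Int → String) (L : List Int) (k : String) :
    ((L.map (fun i => (f i, i))).filter (fun p => p.1 == k)).map (·.2)
      = L.filter (fun i => f i == k) := by
  rw [List.filter_map, List.map_map]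
  simp [Function.comp_def]

-- insertBy into a key-sorted list keeps it key-sorted
lemma pairwise_insertBy {α κ : Type} [LinearOrder κ] (key : α → κ) (x : α) (acc : List α)
    (h : acc.Pairwise (fun a b => key a ≤ key b)) :
    (PySem.List.insertBy (fun a b => decide (key a < key b)) x acc).Pairwise
      (fun a b => key a ≤ key b) := by
  induction acc with
  | nil => simp [PySem.List.insertBy]
  | cons y ys ih =>
    rw [List.pairwise_cons] at h
    obtain ⟨hy, hys⟩ := h
    by_cases hlt : key x < key y
    · rw [show PySem.List.insertBy (fun a b => decide (key a < key b)) x (y :: ys) = x :: y :: ys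
        from by simp [PySem.List.insertBy, hlt]]
      refine List.pairwise_cons.mpr ⟨?_, List.pairwise_cons.mpr ⟨hy, hys⟩⟩
      intro b hb
      rcases List.mem_cons.mp hb with rfl | hb'
      · exact hlt.le
      · exact hlt.le.trans (hy b hb')
    · rw [show PySem.List.insertBy (fun a b => decide (key a < key b)) x (y :: ys)
          = y :: PySem.List.insertBy (fun a b => decide (key a < key b)) x ys
        from by simp [PySem.List.insertBy, hlt]]
      refine List.pairwise_cons.mpr ⟨?_, ih hys⟩
      intro b hb
      rcases (PySem.List.mem_insertBy _ _ _ _).mp hb with rfl | hb'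
      · exact le_of_not_gt (by simpa using hlt)
      · exact hy b hb'

-- stability, one step: inserting x into a key-sorted list puts x after all equal-key elements
lemma filter_insertBy {α κ : Type} [LinearOrder κ] [BEq κ] [LawfulBEq κ]
    (key : α → κ) (k : κ) (x : α) (acc : List α)
    (h : acc.Pairwise (fun a b => key a ≤ key b)) :
    (PySem.List.insertBy (fun a b => decide (key a < key b)) x acc).filter
        (fun y => key y == k)
      = acc.filter (fun y => key y == k) ++ (if key x == k then [x] else []) := by
  induction acc with
  | nil =>
    by_cases hxk : key x == k <;> simp [PySem.List.insertBy, List.filter, hxk]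
  | cons y ys ih =>
    rw [List.pairwise_cons] at h
    obtain ⟨hy, hys⟩ := h
    by_cases hlt : key x < key y
    · rw [show PySem.List.insertBy (fun a b => decide (key a < key b)) x (y :: ys) = x :: y :: ys
        from by simp [PySem.List.insertBy, hlt]]
      by_cases hxk : key x == k
      · have hxk' : key x = k := by simpa using hxk
        have hnil : (y :: ys).filter (fun y => key y == k) = [] := by
          rw [List.filter_eq_nil_iff]
          intro b hb
          have hkb : k < key b := by
            rcases List.mem_cons.mp hb with rfl | hb'
            · rw [← hxk']; exact hlt
            · rw [← hxk']; exact hlt.trans_le (hy b hb')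
          simp [hkb.ne']
        rw [List.filter_cons_of_pos (by simpa using hxk), hnil]
        simp [hxk]
      · rw [List.filter_cons_of_neg (by simpa using hxk)]
        simp [hxk]
    · rw [show PySem.List.insertBy (fun a b => decide (key a < key b)) x (y :: ys)
          = y :: PySem.List.insertBy (fun a b => decide (key a < key b)) x ys
        from by simp [PySem.List.insertBy, hlt]]
      by_cases hyk : key y == k
      · rw [List.filter_cons_of_pos (by simpa using hyk), List.filter_cons_of_pos (by simpa using hyk),
          ih hys, List.cons_append]
      · rw [List.filter_cons_of_neg (by simpa using hyk), List.filter_cons_of_neg (by simpa using hyk),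
          ih hys]

-- stability of PySem's sort: the subsequence with any fixed key is unchanged
lemma sorted_filter_key {α κ : Type} [LinearOrder κ] [BEq κ] [LawfulBEq κ]
    (key : α → κ) (k : κ) (xs : List α) :
    (PySem.List.sorted xs key false).filter (fun y => key y == k)
      = xs.filter (fun y => key y == k) := by
  have aux : ∀ (l acc : List α), acc.Pairwise (fun a b => key a ≤ key b) →
      (l.foldl (fun acc x => PySem.List.insertBy (fun a b => decide (key a < key b)) x acc) acc).filter (fun y => key y == k)
        = acc.filter (fun y => key y == k) ++ l.filter (fun y => key y == k) := by
    intro l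
    induction l with
    | nil => intro acc _; simp
    | cons x t ih =>
      intro acc hacc
      rw [List.foldl_cons, ih _ (pairwise_insertBy key x acc hacc), filter_insertBy key k x acc hacc]
      by_cases hxk : key x == k
      · rw [List.filter_cons_of_pos (by simpa using hxk)]
        simp [hxk]
      · rw [List.filter_cons_of_neg (by simpa using hxk)]
        simp [hxk]
  rw [PySem.List.sorted_eq_foldl_insertBy]
  simpa using aux xs [] (by simp)

-- a cons cell survives a foldl of Set.add over elements all different from the head
lemma foldl_add_cons {α : Type} [BEq α] [LawfulBEq α] (k : α) :
    ∀ (l s : List α), (∀ x ∈ l, x ≠ k) →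
      l.foldl PySem.Set.add (k :: s) = k :: l.foldl PySem.Set.add s := by
  intro l
  induction l with
  | nil => intro s _; rfl
  | cons x t ih =>
    intro s h
    have hx : x ≠ k := h x (List.mem_cons_self ..)
    have hstep : PySem.Set.add (k :: s) x = k :: PySem.Set.add s x := by
      by_cases hm : x ∈ s <;> simp [PySem.Set.add, PySem.Set.contains, hm, hx]
    rw [List.foldl_cons, List.foldl_cons, hstep, ih _ (fun y hy => h y (List.mem_cons_of_mem _ hy))]

-- adding copies of an element already present is a no-op
lemma foldl_add_const {α : Type} [BEq α] [LawfulBEq α] (k : α) :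
    ∀ (l s : List α), (∀ x ∈ l, x = k) → k ∈ s → l.foldl PySem.Set.add s = s := by
  intro l
  induction l with
  | nil => intro s _ _; rfl
  | cons x t ih =>
    intro s h hk
    have hx : x = k := h x (List.mem_cons_self ..)
    have hstep : PySem.Set.add s x = s := by
      subst hx; simp [PySem.Set.add, PySem.Set.contains, hk]
    rw [List.foldl_cons, hstep, ih _ (fun y hy => h y (List.mem_cons_of_mem _ hy)) hk]

-- proof-side helper: the same group-by scan phrased with takeWhile/dropWhile
def pvRunsSpec : List (String × Int) → List (String × List Int)
  | [] => []
  | (k, i) :: rest =>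
      (k, i :: (rest.takeWhile (fun p => p.1 == k)).map (·.2)) ::
        pvRunsSpec (rest.dropWhile (fun p => p.1 == k))
termination_by ps => ps.length
decreasing_by
  simp only [List.length_cons]
  exact Nat.lt_succ_of_le (List.length_dropWhile_le _ _)

lemma pvRunsGo_spec :
    ∀ (rest : List (String × Int)) (k : String) (pos : List Int),
      pvRunsGo k pos rest
        = (k, pos ++ (rest.takeWhile (fun p => p.1 == k)).map (·.2)) ::
            pvRunsSpec (rest.dropWhile (fun p => p.1 == k)) := by
  intro rest
  induction rest with
  | nil => intro k pos; simp [pvRunsGo, pvRunsSpec]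
  | cons p t ih =>
    intro k pos
    obtain ⟨k', i⟩ := p
    by_cases hk : k' == k
    · have hk' : k' = k := by simpa using hk
      subst hk'
      rw [show pvRunsGo k' pos ((k', i) :: t) = pvRunsGo k' (pos ++ [i]) t from by
        simp [pvRunsGo]]
      rw [ih k' (pos ++ [i])]
      rw [List.takeWhile_cons_of_pos (by simp), List.dropWhile_cons_of_pos (by simp)]
      simp
    · rw [show pvRunsGo k pos ((k', i) :: t) = (k, pos) :: pvRunsGo k' [i] t from by
        simp [pvRunsGo, hk]]
      rw [ih k' [i]]
      rw [show List.takeWhile (fun p => p.1 == k) ((k', i) :: t) = [] from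
            List.takeWhile_cons_of_neg hk,
          show List.dropWhile (fun p => p.1 == k) ((k', i) :: t) = (k', i) :: t from
            List.dropWhile_cons_of_neg hk]
      rw [show pvRunsSpec ((k', i) :: t)
          = (k', i :: (t.takeWhile (fun p => p.1 == k')).map (·.2)) ::
              pvRunsSpec (t.dropWhile (fun p => p.1 == k')) from by rw [pvRunsSpec]]
      simp

lemma pvRuns_eq_spec (ps : List (String × Int)) : pvRuns ps = pvRunsSpec ps := by
  cases ps with
  | nil => rw [pvRunsSpec]; rfl
  | cons p rest =>
    obtain ⟨k, i⟩ := p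
    rw [show pvRuns ((k, i) :: rest) = pvRunsGo k [i] rest from rfl, pvRunsGo_spec rest k [i]]
    rw [show pvRunsSpec ((k, i) :: rest)
        = (k, i :: (rest.takeWhile (fun p => p.1 == k)).map (·.2)) ::
            pvRunsSpec (rest.dropWhile (fun p => p.1 == k)) from by rw [pvRunsSpec]]
    simp

-- after dropWhile (== k) on a key-sorted list whose keys are all ≥ k, no key k remains
lemma dropWhile_no_key (k : String) :
    ∀ (ps : List (String × Int)), ps.Pairwise (fun a b => a.1 ≤ b.1) →
      (∀ p ∈ ps, k ≤ p.1) →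
      ∀ p ∈ ps.dropWhile (fun p => p.1 == k), p.1 ≠ k := by
  intro ps
  induction ps with
  | nil => intro _ _ p hp; simp at hp
  | cons a t ih =>
    intro hpw hge
    rw [List.pairwise_cons] at hpw
    obtain ⟨ha, ht⟩ := hpw
    by_cases hak : a.1 == k
    · rw [show List.dropWhile (fun p => p.1 == k) (a :: t) = List.dropWhile (fun p => p.1 == k) t
        from List.dropWhile_cons_of_pos hak]
      exact ih ht (fun p hp => hge p (List.mem_cons_of_mem _ hp))
    · rw [show List.dropWhile (fun p => p.1 == k) (a :: t) = a :: t
        from List.dropWhile_cons_of_neg hak]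
      intro p hp
      have hka : k < a.1 :=
        lt_of_le_of_ne (hge a (List.mem_cons_self ..)) (fun he => hak (by simp [he.symm]))
      rcases List.mem_cons.mp hp with rfl | hp'
      · exact hka.ne'
      · exact (hka.trans_le (ha p hp')).ne'

-- the group-by scan on a key-sorted pair list: one group per distinct key, holding the
-- second components of exactly the pairs with that key, in order
lemma runs_char :
    ∀ (ps : List (String × Int)), ps.Pairwise (fun a b => a.1 ≤ b.1) →
      pvRunsSpec ps = (PySem.Set.ofList (ps.map (·.1))).map
        (fun k => (k, (ps.filter (fun p => p.1 == k)).map (·.2))) := by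
  intro ps
  induction ps using pvRunsSpec.induct with
  | case1 => intro _; simp [pvRunsSpec, PySem.Set.ofList, PySem.Set.empty]
  | case2 k i rest ih =>
    intro hpw
    rw [List.pairwise_cons] at hpw
    obtain ⟨hk, hrest⟩ := hpw
    set run := rest.takeWhile (fun p => p.1 == k) with hrun
    set rest' := rest.dropWhile (fun p => p.1 == k) with hrest'
    have hsplit : run ++ rest' = rest := List.takeWhile_append_dropWhile
    have hrest'pw : rest'.Pairwise (fun a b => a.1 ≤ b.1) :=
      hrest.sublist (List.dropWhile_sublist _)
    have hno : ∀ p ∈ rest', p.1 ≠ k :=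
      dropWhile_no_key k rest hrest (fun p hp => hk p hp)
    have hrunk : ∀ p ∈ run, p.1 = k := by
      intro p hp
      have := List.mem_takeWhile_imp hp
      simpa using this
    -- the key list of the whole input
    have hofList : PySem.Set.ofList (((k, i) :: rest).map (·.1))
        = k :: PySem.Set.ofList (rest'.map (·.1)) := by
      rw [← hsplit, List.map_cons, List.map_append]
      show List.foldl PySem.Set.add PySem.Set.empty (k :: (run.map (·.1) ++ rest'.map (·.1)))
        = k :: List.foldl PySem.Set.add PySem.Set.empty (rest'.map (·.1))
      rw [List.foldl_cons, List.foldl_append]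
      have h1 : PySem.Set.add PySem.Set.empty k = [k] := by
        simp [PySem.Set.add, PySem.Set.contains, PySem.Set.empty]
      have h2 : (run.map (·.1)).foldl PySem.Set.add [k] = [k] :=
        foldl_add_const k _ _ (by intro y hy; obtain ⟨p, hp, rfl⟩ := List.mem_map.mp hy; exact hrunk p hp)
          (List.mem_singleton.mpr rfl)
      have h3 : (rest'.map (·.1)).foldl PySem.Set.add [k]
          = k :: (rest'.map (·.1)).foldl PySem.Set.add [] :=
        foldl_add_cons k _ _ (by intro y hy; obtain ⟨p, hp, rfl⟩ := List.mem_map.mp hy; exact hno p hp)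
      rw [h1, h2, h3]
      rfl
    -- the head group
    have hfilterk : (((k, i) :: rest).filter (fun p => p.1 == k)) = (k, i) :: run := by
      rw [List.filter_cons_of_pos (by simp), ← hsplit, List.filter_append]
      have h1 : run.filter (fun p => p.1 == k) = run :=
        List.filter_eq_self.mpr (fun p hp => by simp [hrunk p hp])
      have h2 : rest'.filter (fun p => p.1 == k) = [] :=
        List.filter_eq_nil_iff.mpr (fun p hp => by simp [hno p hp])
      rw [h1, h2, List.append_nil]
    -- groups for later keys read only rest'
    have htail : ∀ k' ∈ PySem.Set.ofList (rest'.map (·.1)),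
        ((k, i) :: rest).filter (fun p => p.1 == k') = rest'.filter (fun p => p.1 == k') := by
      intro k' hk'
      have hk'mem : k' ∈ rest'.map (·.1) := (PySem.Set.mem_ofList _ _).mp hk'
      obtain ⟨p0, hp0, rfl⟩ := List.mem_map.mp hk'mem
      have hkne : k ≠ p0.1 := fun he => hno p0 hp0 he.symm
      rw [List.filter_cons_of_neg (by simp [hkne]), ← hsplit, List.filter_append]
      have h1 : run.filter (fun p => p.1 == p0.1) = [] :=
        List.filter_eq_nil_iff.mpr (fun p hp => by simp [hrunk p hp, hkne])
      rw [h1, List.nil_append]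
    rw [show pvRunsSpec ((k, i) :: rest)
        = (k, i :: run.map (·.2)) :: pvRunsSpec rest' from by rw [pvRunsSpec]]
    rw [ih hrest'pw, hofList, List.map_cons]
    congr 1
    · rw [hfilterk]
      simp
    · apply List.map_congr_left
      intro k' hk'
      rw [htail k' hk']

-- the first index carrying each distinct substring grows along first-occurrence order
lemma headD_append_left {α : Type} (a b : List α) (d : α) (h : a ≠ []) :
    (a ++ b).headD d = a.headD d := by
  cases a with
  | nil => exact absurd rfl h
  | cons x t => rfl

lemma headD_mem_of_ne_nil {α : Type} (xs : List α) (d : α) (h : xs ≠ []) :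
    xs.headD d ∈ xs := by
  cases xs with
  | nil => exact absurd rfl h
  | cons x t => exact List.mem_cons_self ..

lemma firstIdx_pairwise (f : Int → String) :
    ∀ (L : List Int), L.Pairwise (· < ·) →
      (PySem.Set.ofList (L.map f)).Pairwise
        (fun k k' => (L.filter (fun i => f i == k)).headD 0
                   < (L.filter (fun i => f i == k')).headD 0) := by
  intro L
  induction L using List.reverseRecOn with
  | nil => intro _; simp [PySem.Set.ofList, PySem.Set.empty]
  | append_singleton L x ih =>
    intro hpw
    rw [List.pairwise_append] at hpw
    obtain ⟨hL, _, hlt⟩ := hpw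
    have hltx : ∀ a ∈ L, a < x := fun a ha => hlt a ha x (List.mem_singleton.mpr rfl)
    rw [List.map_append, List.map_singleton, PySem.Set.ofList_append_singleton]
    -- filters over L ++ [x], for keys already present in L
    have hold : ∀ k, k ∈ PySem.Set.ofList (L.map f) →
        ((L ++ [x]).filter (fun i => f i == k)).headD 0
          = (L.filter (fun i => f i == k)).headD 0 := by
      intro k hkmem
      have hk' : k ∈ L.map f := (PySem.Set.mem_ofList _ _).mp hkmem
      obtain ⟨i0, hi0, rfl⟩ := List.mem_map.mp hk'
      have hne : L.filter (fun i => f i == f i0) ≠ [] := by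
        intro hnil
        have := List.filter_eq_nil_iff.mp hnil i0 hi0
        simp at this
      rw [List.filter_append, headD_append_left _ _ _ hne]
    by_cases hc : PySem.Set.contains (PySem.Set.ofList (L.map f)) (f x)
    · rw [show (PySem.Set.ofList (L.map f)).add (f x) = PySem.Set.ofList (L.map f) from by
        simp only [PySem.Set.add]; rw [if_pos hc]]
      refine (ih hL).imp_of_mem ?_
      intro a b ha hb hrel
      rw [hold a ha, hold b hb]
      exact hrel
    · have hnomem : f x ∉ L.map f := fun hmem =>
        hc ((PySem.Set.contains_iff _ _).mpr ((PySem.Set.mem_ofList _ _).mpr hmem))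
      rw [show (PySem.Set.ofList (L.map f)).add (f x) = PySem.Set.ofList (L.map f) ++ [f x] from by
        simp only [PySem.Set.add]; rw [if_neg hc]]
      rw [List.pairwise_append]
      refine ⟨(ih hL).imp_of_mem ?_, List.pairwise_singleton _ _, ?_⟩
      · intro a b ha hb hrel
        rw [hold a ha, hold b hb]
        exact hrel
      · intro a ha b hb
        rw [List.mem_singleton] at hb
        subst hb
        rw [hold a ha]
        have hfx : (L ++ [x]).filter (fun i => f i == f x) = [x] := by
          rw [List.filter_append]
          have h1 : L.filter (fun i => f i == f x) = [] :=
            List.filter_eq_nil_iff.mpr (fun i hi => by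
              simp only [beq_iff_eq]
              intro he
              exact hnomem (he ▸ List.mem_map_of_mem hi))
          rw [h1, List.nil_append]
          simp
        rw [hfx]
        have hamem : a ∈ L.map f := (PySem.Set.mem_ofList _ _).mp ha
        obtain ⟨i0, hi0, rfl⟩ := List.mem_map.mp hamem
        have hne : L.filter (fun i => f i == f i0) ≠ [] := by
          intro hnil
          have := List.filter_eq_nil_iff.mp hnil i0 hi0
          simp at this
        have hmem := headD_mem_of_ne_nil _ (0 : Int) hne
        have : (L.filter (fun i => f i == f i0)).headD 0 ∈ L := List.mem_of_mem_filter hmem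
        simpa using hltx _ this
-- range(a, b) is strictly increasing
lemma pyRange_pairwise_lt (a b : Int) :
    (PySem.List.pyRange a b 1).Pairwise (· < ·) := by
  rw [PySem.List.pyRange_one]
  refine List.Pairwise.map _ ?_ (List.pairwise_lt_range)
  intro k k' hk
  omega

-- dict(ps) on a list with pairwise-distinct keys is ps itself
lemma update_items_disjoint {ν : Type} :
    ∀ (ps : List (String × ν)) (d : PySem.Dict String ν), (ps.map (·.1)).Nodup →
      (∀ k ∈ ps.map (·.1), d.contains k = false) → (d.update ps).items = d.items ++ ps := by
  intro ps
  induction ps with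
  | nil => intro d _ _; simp [PySem.Dict.update]
  | cons p t ih =>
    intro d hnd hdis
    obtain ⟨k, v⟩ := p
    have hk : d.contains k = false := hdis k (by simp)
    have hins : (d.insert k v).items = d.items ++ [(k, v)] := by
      simp [PySem.Dict.insert, hk]
    have hnd' : (t.map (·.1)).Nodup := (List.nodup_cons.mp (by simpa using hnd)).2
    have hknotin : k ∉ t.map (·.1) := (List.nodup_cons.mp (by simpa using hnd)).1
    have hdis' : ∀ k' ∈ t.map (·.1), (d.insert k v).contains k' = false := by
      intro k' hk'
      have h1 : d.contains k' = false := hdis k' (by simp [hk'])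
      have h2 : k ≠ k' := fun he => hknotin (he ▸ hk')
      simp only [PySem.Dict.contains, hins, List.any_append]
      simp only [PySem.Dict.contains] at h1
      simp [h1, h2]
    have : d.update ((k, v) :: t) = (d.insert k v).update t := by
      simp [PySem.Dict.update]
    rw [this, ih _ hnd' hdis', hins, List.append_assoc]
    rfl

lemma items_ofList_nodup {ν : Type} (ps : List (String × ν))
    (h : (ps.map (·.1)).Nodup) : (PySem.Dict.ofList ps).items = ps := by
  have := update_items_disjoint ps PySem.Dict.empty h
    (by intro k _; simp [PySem.Dict.contains, PySem.Dict.empty])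
  simpa [PySem.Dict.ofList, PySem.Dict.empty] using this

-- pyGetD _ 0 on a nonempty list is its head
lemma pyGetD_zero_headD {α : Type} (xs : List α) (d : α) (h : xs ≠ []) :
    PySem.List.pyGetD xs 0 d = xs.headD d := by
  cases xs with
  | nil => exact absurd rfl h
  | cons x t => rw [PySem.List.pyGetD_zero_cons]; rfl

-- the whole equivalence, abstracted over the index list and the substring map
lemma core (f : Int → String) (L : List Int) (hLpw : L.Pairwise (· < ·)) :
    ((L.foldl (fun (d : PySem.Dict String (List Int)) i => d.modify (f i) [] (fun v => v ++ [i]))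
        PySem.Dict.empty).items).filter (fun kv => decide (kv.2.length > 1))
    = (PySem.Dict.ofList (PySem.List.sorted
        ((pvRuns (PySem.List.sorted (L.map (fun i => (f i, i))) (fun p => p.1) false)).filter
          (fun kp => decide (kp.2.length > 1)))
        (fun kp => PySem.List.pyGetD kp.2 0 0) false)).items := by
  set P : List (String × Int) := L.map (fun i => (f i, i)) with hP
  set S : List (String × Int) := PySem.List.sorted P (fun p => p.1) false with hS
  set g : String → String × List Int :=
    fun k => (k, (P.filter (fun p => p.1 == k)).map (·.2)) with hg
  set q : String → Bool := fun k => decide (1 < (L.filter (fun i => f i == k)).length) with hq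
  have hSpw : S.Pairwise (fun a b => a.1 ≤ b.1) := PySem.List.sorted_pairwise P (fun p => p.1)
  have hstab : ∀ k, S.filter (fun p => p.1 == k) = P.filter (fun p => p.1 == k) := by
    intro k
    exact sorted_filter_key (fun p : String × Int => p.1) k P
  have hruns : pvRuns S = (PySem.Set.ofList (S.map (·.1))).map g := by
    rw [pvRuns_eq_spec, runs_char S hSpw]
    apply List.map_congr_left
    intro k _
    rw [hstab k]
  have hcomp : ((fun kv : String × List Int => decide (kv.2.length > 1)) ∘ g) = q := by
    funext k
    simp only [Function.comp_apply, hg, hq]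
    rw [show ((P.filter (fun p => p.1 == k)).map (·.2)).length
        = (L.filter (fun i => f i == k)).length from by rw [filter_pairs_map_snd f L k]]
  have hpred : ∀ (M : List String),
      (M.map g).filter (fun kv => decide (kv.2.length > 1)) = (M.filter q).map g := by
    intro M
    rw [List.filter_map, hcomp]
  have hPf : P.map (·.1) = L.map f := by
    simp [hP, List.map_map, Function.comp_def]
  -- A's side
  rw [items_group f L, hpred]
  -- B's side: the final sort restores first-occurrence order
  have hKAnodup : (((PySem.Set.ofList (L.map f)).filter q).map g).map (·.1)
      = (PySem.Set.ofList (L.map f)).filter q := by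
    rw [List.map_map]
    simp [hg, Function.comp_def]
  have hsorted_eq : PySem.List.sorted
      ((pvRuns S).filter (fun kp => decide (kp.2.length > 1)))
      (fun kp => PySem.List.pyGetD kp.2 0 0) false
      = ((PySem.Set.ofList (L.map f)).filter q).map g := by
    apply PySem.List.sorted_eq_of_perm_of_pairwise_lt
    · -- permutation
      rw [hruns, hpred]
      apply List.Perm.map
      apply List.Perm.filter
      apply (List.perm_ext_iff_of_nodup (PySem.Set.nodup_ofList _) (PySem.Set.nodup_ofList _)).mpr
      intro a
      rw [PySem.Set.mem_ofList, PySem.Set.mem_ofList, ← hPf]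
      exact ((PySem.List.sorted_perm P (fun p => p.1) false).map (·.1)).mem_iff.symm
    · -- strictly increasing first positions along first-occurrence order
      rw [List.pairwise_map]
      have h0 := (firstIdx_pairwise f L hLpw).filter q
      refine h0.imp_of_mem ?_
      intro a b ha hb hrel
      have hmema : a ∈ L.map f := (PySem.Set.mem_ofList _ _).mp (List.mem_of_mem_filter ha)
      have hmemb : b ∈ L.map f := (PySem.Set.mem_ofList _ _).mp (List.mem_of_mem_filter hb)
      have hga : (g a).2 = L.filter (fun i => f i == a) := by
        simp only [hg]
        exact filter_pairs_map_snd f L a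
      have hgb : (g b).2 = L.filter (fun i => f i == b) := by
        simp only [hg]
        exact filter_pairs_map_snd f L b
      have hnea : L.filter (fun i => f i == a) ≠ [] := by
        obtain ⟨i0, hi0, rfl⟩ := List.mem_map.mp hmema
        intro hnil
        have := List.filter_eq_nil_iff.mp hnil i0 hi0
        simp at this
      have hneb : L.filter (fun i => f i == b) ≠ [] := by
        obtain ⟨i0, hi0, rfl⟩ := List.mem_map.mp hmemb
        intro hnil
        have := List.filter_eq_nil_iff.mp hnil i0 hi0
        simp at this
      rw [hga, hgb, pyGetD_zero_headD _ _ hnea, pyGetD_zero_headD _ _ hneb]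
      exact hrel
  rw [hsorted_eq, items_ofList_nodup _ (by rw [hKAnodup]; exact (PySem.Set.nodup_ofList _).filter _)]

-- ===== VERDICT (by name: the statement is the Claim_ definition above) =====
theorem find_all_repeating_patterns_spec : Claim_equal_find_all_repeating_patterns := by
  intro data length _
  unfold Spec_find_all_repeating_patterns
  unfold find_all_repeating_patterns find_all_repeating_patterns_alt
  exact core (fun i => PySem.Str.slice data (some i) (some (i + length)))
    (PySem.List.pyRange 0 ((PySem.Str.len data : Int) - length + 1) 1)
    (pyRange_pairwise_lt 0 ((PySem.Str.len data : Int) - length + 1))
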